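-- pv_equiv track=rewrite | github.com/sakhoshdel/scraping | bots/saymandigital/scrappy_pages.py | extract_model_form_title_en
-- ===== SOURCE A (Python) =====
-- def extract_model_form_title_en(title_en):
--     title_en_list = title_en.split(' ')
--
--     model = ''
--     for word in title_en_list[1:]:
--         if 'GB' in word:
--             break
--         if word in ['Dual', 'Single', 'DualSIM']:
--             break
--         model += word + ' '
--         if word == 'Mini':
--             break
--     return model.strip()
-- ===== SOURCE B (Python) =====
-- def extract_model_form_title_en(title_en):
--     words = title_en.split(' ')[1:]
--     cutoff = len(words)
--     for i, w in enumerate(words):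
--         if 'GB' in w or w in ('Dual', 'Single', 'DualSIM'):
--             cutoff = i
--             break
--         if w == 'Mini':
--             cutoff = i + 1
--             break
--     return ' '.join(words[:cutoff]).strip()
-- ===== Notes on version B (the rewrite author's own statement) =====
-- stated objective: simpler
-- what changed: Instead of growing a model string word by word inside the loop, B scans once for a single integer cutoff index (exclusive for the GB/Dual/Single/DualSIM stops, inclusive for Mini) and afterwards space-joins the slice of words up to that index and strips it.
import Mathlib
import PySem

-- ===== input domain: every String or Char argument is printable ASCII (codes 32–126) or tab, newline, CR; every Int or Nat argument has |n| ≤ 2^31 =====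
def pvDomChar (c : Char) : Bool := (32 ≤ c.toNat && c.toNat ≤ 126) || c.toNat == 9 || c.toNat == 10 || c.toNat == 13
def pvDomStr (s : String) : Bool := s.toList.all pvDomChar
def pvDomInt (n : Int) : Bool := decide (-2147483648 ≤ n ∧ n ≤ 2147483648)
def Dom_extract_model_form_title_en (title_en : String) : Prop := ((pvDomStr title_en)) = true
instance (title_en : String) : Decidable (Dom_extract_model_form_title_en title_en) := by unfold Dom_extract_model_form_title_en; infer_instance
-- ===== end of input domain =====

-- B replaces A's in-loop string accumulation by a scan that computes one integer
-- cutoff index and then joins the corresponding slice (objective: simpler).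

-- ===== PORT A =====
-- A's for-loop with its early breaks, carrying the growing 'model' string (as List Char)
def pvALoop : List (List Char) → List Char → List Char
  | [], m => m
  | w :: ws, m =>
    if PySem.Chars.isIn "GB".toList w then m
    else if w ∈ ["Dual".toList, "Single".toList, "DualSIM".toList] then m
    else
      let m' := m ++ w ++ [' ']
      if w = "Mini".toList then m' else pvALoop ws m'

def extract_model_form_title_en (title_en : String) : String :=
  let title_en_list := PySem.Chars.splitOn title_en.toList " ".toList
  let model := pvALoop (PySem.List.slice title_en_list (some 1) none) []
  String.ofList (PySem.Chars.strip model)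

-- ===== PORT B =====
-- B's scan for the cutoff index: exclusive stop on GB/Dual/Single/DualSIM, inclusive on Mini
def pvBCut : List (List Char) → Nat
  | [] => 0
  | w :: ws =>
    if PySem.Chars.isIn "GB".toList w = true ∨ w ∈ ["Dual".toList, "Single".toList, "DualSIM".toList] then 0
    else if w = "Mini".toList then 1
    else pvBCut ws + 1

def extract_model_form_title_en_alt (title_en : String) : String :=
  let words := PySem.List.slice (PySem.Chars.splitOn title_en.toList " ".toList) (some 1) none
  let cutoff := pvBCut words
  String.ofList (PySem.Chars.strip (PySem.Chars.join [' '] (words.take cutoff)))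

-- ===== PRECONDITION & SPEC =====
def Spec_extract_model_form_title_en (title_en : String) (out : String) : Prop := out = extract_model_form_title_en_alt title_en
instance (title_en : String) (out : String) : Decidable (Spec_extract_model_form_title_en title_en out) := by unfold Spec_extract_model_form_title_en; infer_instance

-- ===== CLAIM (what is proved, stated in full; the proofs are below) =====
def Claim_equal_extract_model_form_title_en : Prop := ∀ (title_en : String), Dom_extract_model_form_title_en title_en → Spec_extract_model_form_title_en title_en (extract_model_form_title_en title_en)

-- ===== LEMMAS AND PROOFS =====

-- A's loop appends, to its accumulator, each kept word followed by a space;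
-- the kept words are exactly the first pvBCut of the list.
theorem pvALoop_eq (ws : List (List Char)) (m : List Char) :
    pvALoop ws m = m ++ ((ws.take (pvBCut ws)).map (· ++ [' '])).flatten := by
  induction ws generalizing m with
  | nil => simp [pvALoop, pvBCut]
  | cons w ws ih =>
    simp only [pvALoop, pvBCut]
    split_ifs with h1 h2 h3 h4 <;> try tauto
    · simp
    · simp
    · simp
    · rw [ih]; simp [List.take_succ_cons]

-- dropping one trailing space does not change rstrip
theorem rstrip_append_space (x : List Char) :
    PySem.Chars.rstrip (x ++ [' ']) = PySem.Chars.rstrip x := by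
  simp [PySem.Chars.rstrip, PySem.Chars.isspace]

-- dropping one trailing space does not change strip
theorem strip_append_space (x : List Char) :
    PySem.Chars.strip (x ++ [' ']) = PySem.Chars.strip x := by
  unfold PySem.Chars.strip PySem.Chars.lstrip
  rw [List.dropWhile_append]
  by_cases h : (List.dropWhile PySem.Chars.isspace x).isEmpty
  · simp [List.dropWhile, PySem.Chars.isspace, PySem.Chars.rstrip,
      List.isEmpty_iff.mp h]
  · simp [h, rstrip_append_space]

-- each-word-plus-space flattening equals the space-join followed by one trailing space
theorem flatten_map_space (l : List (List Char)) (hl : l ≠ []) :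
    (l.map (· ++ [' '])).flatten = PySem.Chars.join [' '] l ++ [' '] := by
  induction l with
  | nil => simp at hl
  | cons a l ih =>
    cases l with
    | nil => simp [PySem.Chars.join, List.intercalate]
    | cons b l' =>
      have h := ih (by simp)
      simp only [List.map_cons, List.flatten_cons] at h ⊢
      rw [h]
      simp [PySem.Chars.join, List.intercalate]

theorem strip_flatten_eq_strip_join (l : List (List Char)) :
    PySem.Chars.strip ((l.map (· ++ [' '])).flatten) =
    PySem.Chars.strip (PySem.Chars.join [' '] l) := by
  cases l with
  | nil => simp [PySem.Chars.join, List.intercalate]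
  | cons a l' =>
    rw [flatten_map_space _ (by simp), strip_append_space]

-- ===== VERDICT (by name: the statement is the Claim_ definition above) =====
theorem extract_model_form_title_en_spec : Claim_equal_extract_model_form_title_en := by
  intro title_en _
  unfold Spec_extract_model_form_title_en extract_model_form_title_en extract_model_form_title_en_alt
  simp only [pvALoop_eq, List.nil_append, strip_flatten_eq_strip_join]
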